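-- pv_equiv track=rewrite | github.com/zhan-a/Kozha | server/server.py | reorder_tokens
-- ===== SOURCE A (Python) =====
-- GRAMMAR_PROFILES = {
--     "bsl":      {"verb_final": False, "time_first": True},
--     "asl":      {"verb_final": False, "time_first": True},
--     "dgs":      {"verb_final": True,  "time_first": True},
--     "lsf":      {"verb_final": True,  "time_first": True},
--     "lse":      {"verb_final": False, "time_first": True},
--     "pjm":      {"verb_final": False, "time_first": True},
--     "gsl":      {"verb_final": False, "time_first": True},
--     "ngt":      {"verb_final": True,  "time_first": True},
--     "rsl":      {"verb_final": True,  "time_first": True},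
--     "algerian": {"verb_final": False, "time_first": True},
--     "bangla":   {"verb_final": False, "time_first": True},
--     "fsl":      {"verb_final": False, "time_first": True},
--     "isl":      {"verb_final": False, "time_first": True},
--     "kurdish":  {"verb_final": False, "time_first": True},
--     "vsl":      {"verb_final": False, "time_first": True},
--     "ksl":      {"verb_final": True,  "time_first": True},
-- }
--
-- DEFAULT_GRAMMAR = {"verb_final": False, "time_first": True}
--
-- def get_grammar(sign_language: str) -> dict:
--     return GRAMMAR_PROFILES.get(sign_language, DEFAULT_GRAMMAR)
--
-- def reorder_tokens(tokens_with_pos, sign_language: str, time_words: set,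
--                     question_words: set = None) -> list:
--     grammar = get_grammar(sign_language)
--     time_tokens = []
--     verb_tokens = []
--     question_tokens = []
--     other_tokens = []
--
--     for text, pos in tokens_with_pos:
--         if text in time_words:
--             time_tokens.append(text)
--         elif question_words and text in question_words:
--             question_tokens.append(text)
--         elif pos == "VERB" and grammar["verb_final"]:
--             verb_tokens.append(text)
--         else:
--             other_tokens.append(text)
--
--     result = []
--     if grammar["time_first"]:
--         result.extend(time_tokens)
--     else:
--         other_tokens = time_tokens + other_tokens
--
--     result.extend(other_tokens)
--
--     if grammar["verb_final"]:
--         result.extend(verb_tokens)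
--
--     result.extend(question_tokens)
--
--     return result
-- ===== SOURCE B (Python) =====
-- GRAMMAR_PROFILES = {
--     "bsl":      {"verb_final": False, "time_first": True},
--     "asl":      {"verb_final": False, "time_first": True},
--     "dgs":      {"verb_final": True,  "time_first": True},
--     "lsf":      {"verb_final": True,  "time_first": True},
--     "lse":      {"verb_final": False, "time_first": True},
--     "pjm":      {"verb_final": False, "time_first": True},
--     "gsl":      {"verb_final": False, "time_first": True},
--     "ngt":      {"verb_final": True,  "time_first": True},
--     "rsl":      {"verb_final": True,  "time_first": True},
--     "algerian": {"verb_final": False, "time_first": True},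
--     "bangla":   {"verb_final": False, "time_first": True},
--     "fsl":      {"verb_final": False, "time_first": True},
--     "isl":      {"verb_final": False, "time_first": True},
--     "kurdish":  {"verb_final": False, "time_first": True},
--     "vsl":      {"verb_final": False, "time_first": True},
--     "ksl":      {"verb_final": True,  "time_first": True},
-- }
--
-- DEFAULT_GRAMMAR = {"verb_final": False, "time_first": True}
--
-- def get_grammar(sign_language: str) -> dict:
--     return GRAMMAR_PROFILES.get(sign_language, DEFAULT_GRAMMAR)
--
-- def reorder_tokens(tokens_with_pos, sign_language: str, time_words: set,
--                    question_words: set = None) -> list: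
--     grammar = get_grammar(sign_language)
--     qw = question_words if question_words else ()
--     verb_final = grammar["verb_final"]
--
--     def priority(token):
--         text, pos = token
--         if text in time_words:
--             return 0
--         if text in qw:
--             return 3
--         if pos == "VERB" and verb_final:
--             return 2
--         return 1
--
--     return [text for text, _ in sorted(tokens_with_pos, key=priority)]
-- ===== Notes on version B (the rewrite author's own statement) =====
-- stated objective: simpler
-- what changed: Replaces A's four accumulator lists and conditional extends with a single stable sort of the tokens by a 4-valued category priority key (time=0, other=1, verb-when-verb_final=2, question=3), relying on sort stability to keep the original order within each category.
import Mathlib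
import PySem

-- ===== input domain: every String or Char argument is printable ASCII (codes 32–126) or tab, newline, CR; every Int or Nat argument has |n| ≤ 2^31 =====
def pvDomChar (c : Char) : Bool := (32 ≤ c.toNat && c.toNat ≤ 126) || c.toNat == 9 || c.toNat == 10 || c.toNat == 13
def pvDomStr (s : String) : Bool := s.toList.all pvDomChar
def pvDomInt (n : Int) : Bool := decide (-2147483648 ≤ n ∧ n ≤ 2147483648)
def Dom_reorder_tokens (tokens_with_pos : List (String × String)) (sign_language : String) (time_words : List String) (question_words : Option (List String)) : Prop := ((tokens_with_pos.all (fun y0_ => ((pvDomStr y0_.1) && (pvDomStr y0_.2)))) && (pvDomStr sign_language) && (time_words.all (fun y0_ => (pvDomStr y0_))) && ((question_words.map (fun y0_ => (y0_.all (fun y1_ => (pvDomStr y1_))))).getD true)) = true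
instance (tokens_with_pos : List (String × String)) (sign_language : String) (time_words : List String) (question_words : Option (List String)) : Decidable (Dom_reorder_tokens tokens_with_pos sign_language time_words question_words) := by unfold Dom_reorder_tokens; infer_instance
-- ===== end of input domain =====

-- B replaces A's four bucket lists and conditional extends by one stable sort on a
-- 4-valued category key (objective: simpler; same O(n) grouping cost apart from the sort).

-- ===== PORT A =====
-- GRAMMAR_PROFILES: value = (verb_final, time_first)
def grammarProfiles : PySem.Dict String (Bool × Bool) :=
  PySem.Dict.ofList
    [("bsl", (false, true)), ("asl", (false, true)), ("dgs", (true, true)),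
     ("lsf", (true, true)), ("lse", (false, true)), ("pjm", (false, true)),
     ("gsl", (false, true)), ("ngt", (true, true)), ("rsl", (true, true)),
     ("algerian", (false, true)), ("bangla", (false, true)), ("fsl", (false, true)),
     ("isl", (false, true)), ("kurdish", (false, true)), ("vsl", (false, true)),
     ("ksl", (true, true))]

-- DEFAULT_GRAMMAR = {"verb_final": False, "time_first": True}; GRAMMAR_PROFILES.get
def get_grammar (sign_language : String) : Bool × Bool :=
  PySem.Dict.getD grammarProfiles sign_language (false, true)

-- Python truthiness of the optional set `question_words` (None and the empty set are falsy)
def qwTruthy : Option (List String) → Bool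
  | some (_ :: _) => true
  | _ => false

-- accumulator: (time_tokens, verb_tokens, question_tokens, other_tokens)
def reorder_tokens (tokens_with_pos : List (String × String)) (sign_language : String) (time_words : List String) (question_words : Option (List String)) : List String :=
  let grammar := get_grammar sign_language
  let acc := tokens_with_pos.foldl
    (fun (acc : List String × List String × List String × List String) tp =>
      if time_words.contains tp.1 then
        (acc.1 ++ [tp.1], acc.2.1, acc.2.2.1, acc.2.2.2)
      else if qwTruthy question_words && (question_words.getD []).contains tp.1 then
        (acc.1, acc.2.1, acc.2.2.1 ++ [tp.1], acc.2.2.2)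
      else if tp.2 == "VERB" && grammar.1 then
        (acc.1, acc.2.1 ++ [tp.1], acc.2.2.1, acc.2.2.2)
      else
        (acc.1, acc.2.1, acc.2.2.1, acc.2.2.2 ++ [tp.1]))
    ([], [], [], [])
  let result : List String := if grammar.2 then acc.1 else []
  let other : List String := if grammar.2 then acc.2.2.2 else acc.1 ++ acc.2.2.2
  let result := result ++ other
  let result := if grammar.1 then result ++ acc.2.1 else result
  result ++ acc.2.2.1

-- ===== PORT B =====
-- the closure's `priority`, with the captured variables as explicit parameters
def prio (time_words ql : List String) (verb_final : Bool) (tp : String × String) : Int :=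
  if time_words.contains tp.1 then 0
  else if ql.contains tp.1 then 3
  else if tp.2 == "VERB" && verb_final then 2
  else 1

def reorder_tokens_alt (tokens_with_pos : List (String × String)) (sign_language : String) (time_words : List String) (question_words : Option (List String)) : List String :=
  let grammar := get_grammar sign_language
  let ql : List String := if qwTruthy question_words then question_words.getD [] else []
  (PySem.List.sorted tokens_with_pos (prio time_words ql grammar.1) false).map (·.1)

-- ===== PRECONDITION & SPEC =====
def Spec_reorder_tokens (tokens_with_pos : List (String × String)) (sign_language : String) (time_words : List String) (question_words : Option (List String)) (out : List String) : Prop := out = reorder_tokens_alt tokens_with_pos sign_language time_words question_words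
instance (tokens_with_pos : List (String × String)) (sign_language : String) (time_words : List String) (question_words : Option (List String)) (out : List String) : Decidable (Spec_reorder_tokens tokens_with_pos sign_language time_words question_words out) := by unfold Spec_reorder_tokens; infer_instance

-- ===== CLAIM (what is proved, stated in full; the proofs are below) =====
def Claim_equal_reorder_tokens : Prop := ∀ (tokens_with_pos : List (String × String)) (sign_language : String) (time_words : List String) (question_words : Option (List String)), Dom_reorder_tokens tokens_with_pos sign_language time_words question_words → Spec_reorder_tokens tokens_with_pos sign_language time_words question_words (reorder_tokens tokens_with_pos sign_language time_words question_words)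

-- ===== LEMMAS AND PROOFS =====

-- every grammar profile (and the default) has time_first = true
theorem time_first_true (s : String) : (get_grammar s).2 = true := by
  unfold get_grammar
  simp only [PySem.Dict.getD, PySem.Dict.get?]
  cases hf : List.find? (fun p => p.1 == s) grammarProfiles.items with
  | none => rfl
  | some p =>
    have hmem := List.mem_of_find?_eq_some hf
    have hall : ∀ q ∈ grammarProfiles.items, q.2.2 = true := by decide
    simp [hall p hmem]

-- A's second branch condition equals membership in B's `ql`
theorem cond_q (qw : Option (List String)) (t : String) :
    (qwTruthy qw && (qw.getD []).contains t)
      = ((if qwTruthy qw then qw.getD [] else []).contains t) := by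
  match qw with
  | none => rfl
  | some [] => rfl
  | some (x :: xs) => rfl

-- the k-th category of a token list, as pairs (Fk) and as texts (grp)
def Fk (tws ql : List String) (vf : Bool) (k : Int) (tw : List (String × String)) : List (String × String) :=
  tw.filter (fun tp => prio tws ql vf tp == k)

def grp (tws ql : List String) (vf : Bool) (k : Int) (tw : List (String × String)) : List String :=
  (Fk tws ql vf k tw).map (·.1)

theorem prio_cases (tws ql : List String) (vf : Bool) (tp : String × String) :
    prio tws ql vf tp = 0 ∨ prio tws ql vf tp = 1 ∨ prio tws ql vf tp = 2 ∨ prio tws ql vf tp = 3 := by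
  unfold prio; split_ifs <;> simp

theorem prio_ne_two (tws ql : List String) (tp : String × String) :
    prio tws ql false tp ≠ 2 := by
  unfold prio; split_ifs with h1 h2 h3 <;> simp_all

theorem foldA (tws ql : List String) (vf : Bool) (tw : List (String × String))
    (a b c d : List String) :
    tw.foldl
      (fun (acc : List String × List String × List String × List String) tp =>
        if tws.contains tp.1 then
          (acc.1 ++ [tp.1], acc.2.1, acc.2.2.1, acc.2.2.2)
        else if ql.contains tp.1 then
          (acc.1, acc.2.1, acc.2.2.1 ++ [tp.1], acc.2.2.2)
        else if tp.2 == "VERB" && vf then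
          (acc.1, acc.2.1 ++ [tp.1], acc.2.2.1, acc.2.2.2)
        else
          (acc.1, acc.2.1, acc.2.2.1, acc.2.2.2 ++ [tp.1]))
      (a, b, c, d)
    = (a ++ grp tws ql vf 0 tw, b ++ grp tws ql vf 2 tw, c ++ grp tws ql vf 3 tw,
       d ++ grp tws ql vf 1 tw) := by
  induction tw generalizing a b c d with
  | nil => simp [grp, Fk]
  | cons x xs ih =>
    by_cases h0 : x.1 ∈ tws
    · have hx : prio tws ql vf x = 0 := by simp [prio, h0]
      rw [List.foldl_cons, if_pos (by simpa using h0)]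
      rw [ih]
      simp [grp, Fk, List.filter_cons, hx]
    · by_cases h1 : x.1 ∈ ql
      · have hx : prio tws ql vf x = 3 := by simp [prio, h0, h1]
        rw [List.foldl_cons, if_neg (by simpa using h0), if_pos (by simpa using h1)]
        rw [ih]
        simp [grp, Fk, List.filter_cons, hx]
      · by_cases h2 : x.2 = "VERB" ∧ vf = true
        · have hx : prio tws ql vf x = 2 := by simp [prio, h0, h1, h2]
          rw [List.foldl_cons, if_neg (by simpa using h0), if_neg (by simpa using h1),
            if_pos (by simpa using h2)]
          rw [ih]
          simp [grp, Fk, List.filter_cons, hx]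
        · have hx : prio tws ql vf x = 1 := by simp [prio, h0, h1, h2]
          rw [List.foldl_cons, if_neg (by simpa using h0), if_neg (by simpa using h1),
            if_neg (by simpa using h2)]
          rw [ih]
          simp [grp, Fk, List.filter_cons, hx]

theorem insertBy_append_left {α : Type} (before : α → α → Bool) (x : α) (ys zs : List α)
    (h : ∀ y ∈ ys, before x y = false) :
    PySem.List.insertBy before x (ys ++ zs) = ys ++ PySem.List.insertBy before x zs := by
  induction ys with
  | nil => simp
  | cons y ys ih =>
    have hy : before x y = false := h y (by simp)
    simp [PySem.List.insertBy, hy, ih (fun z hz => h z (by simp [hz]))]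

theorem insertBy_cons_of_forall_before {α : Type} (before : α → α → Bool) (x : α) (ys : List α)
    (h : ∀ y ∈ ys, before x y = true) :
    PySem.List.insertBy before x ys = x :: ys := by
  cases ys with
  | nil => rfl
  | cons y ys => simp [PySem.List.insertBy, h y (by simp)]

theorem sortedB_aux (tws ql : List String) (vf : Bool) (tw : List (String × String))
    (a0 a1 a2 a3 : List (String × String))
    (m0 : ∀ y ∈ a0, prio tws ql vf y = 0) (m1 : ∀ y ∈ a1, prio tws ql vf y = 1)
    (m2 : ∀ y ∈ a2, prio tws ql vf y = 2) (m3 : ∀ y ∈ a3, prio tws ql vf y = 3) :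
    tw.foldl
      (fun acc x =>
        PySem.List.insertBy (fun a b => decide (prio tws ql vf a < prio tws ql vf b)) x acc)
      (a0 ++ a1 ++ a2 ++ a3)
    = (a0 ++ Fk tws ql vf 0 tw) ++ (a1 ++ Fk tws ql vf 1 tw)
        ++ (a2 ++ Fk tws ql vf 2 tw) ++ (a3 ++ Fk tws ql vf 3 tw) := by
  induction tw generalizing a0 a1 a2 a3 with
  | nil => simp [Fk]
  | cons x xs ih =>
    rw [List.foldl_cons]
    have fk_cons : ∀ k : Int, Fk tws ql vf k (x :: xs)
        = (if prio tws ql vf x == k then [x] else []) ++ Fk tws ql vf k xs := by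
      intro k; simp [Fk, List.filter_cons]; split <;> simp
    rcases prio_cases tws ql vf x with hx | hx | hx | hx
    · have e0 : a0 ++ a1 ++ a2 ++ a3 = a0 ++ (a1 ++ (a2 ++ a3)) := by simp
      rw [e0, insertBy_append_left _ _ _ _
        (by intro y hy; simp [hx, m0 y hy]),
        insertBy_cons_of_forall_before _ _ _
        (by intro y hy; simp only [List.mem_append] at hy
            rcases hy with h | h | h
            · simp [hx, m1 y h]
            · simp [hx, m2 y h]
            · simp [hx, m3 y h])]
      have e2 : a0 ++ (x :: (a1 ++ (a2 ++ a3))) = (a0 ++ [x]) ++ a1 ++ a2 ++ a3 := by simp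
      rw [e2, ih (a0 ++ [x]) a1 a2 a3
        (by intro y hy; rcases List.mem_append.1 hy with h | h
            · exact m0 y h
            · simp at h; subst h; exact hx)
        m1 m2 m3]
      simp [fk_cons, hx]
    · have e0 : a0 ++ a1 ++ a2 ++ a3 = a0 ++ (a1 ++ (a2 ++ a3)) := by simp
      rw [e0, insertBy_append_left _ _ _ _
        (by intro y hy; simp [hx, m0 y hy]),
        insertBy_append_left _ _ _ _
        (by intro y hy; simp [hx, m1 y hy]),
        insertBy_cons_of_forall_before _ _ _
        (by intro y hy; rcases List.mem_append.1 hy with h | h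
            · simp [hx, m2 y h]
            · simp [hx, m3 y h])]
      have e2 : a0 ++ (a1 ++ (x :: (a2 ++ a3))) = a0 ++ (a1 ++ [x]) ++ a2 ++ a3 := by simp
      rw [e2, ih a0 (a1 ++ [x]) a2 a3 m0
        (by intro y hy; rcases List.mem_append.1 hy with h | h
            · exact m1 y h
            · simp at h; subst h; exact hx)
        m2 m3]
      simp [fk_cons, hx]
    · have e0 : a0 ++ a1 ++ a2 ++ a3 = (a0 ++ a1) ++ (a2 ++ a3) := by simp
      rw [e0, insertBy_append_left _ _ _ _
        (by intro y hy; rcases List.mem_append.1 hy with h | h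
            · simp [hx, m0 y h]
            · simp [hx, m1 y h]),
        insertBy_append_left _ _ _ _
        (by intro y hy; simp [hx, m2 y hy]),
        insertBy_cons_of_forall_before _ _ _
        (by intro y hy; simp [hx, m3 y hy])]
      have e2 : (a0 ++ a1) ++ (a2 ++ (x :: a3)) = a0 ++ a1 ++ (a2 ++ [x]) ++ a3 := by simp
      rw [e2, ih a0 a1 (a2 ++ [x]) a3 m0 m1
        (by intro y hy; rcases List.mem_append.1 hy with h | h
            · exact m2 y h
            · simp at h; subst h; exact hx)
        m3]
      simp [fk_cons, hx]
    · have e0 : a0 ++ a1 ++ a2 ++ a3 = (a0 ++ a1 ++ a2) ++ a3 := by simp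
      rw [e0, insertBy_append_left _ _ _ _
        (by intro y hy; simp only [List.append_assoc, List.mem_append] at hy
            rcases hy with h | h | h
            · simp [hx, m0 y h]
            · simp [hx, m1 y h]
            · simp [hx, m2 y h]),
        PySem.List.insertBy_of_forall_not_before _ _ _
        (by intro y hy; simp [hx, m3 y hy])]
      have e2 : (a0 ++ a1 ++ a2) ++ (a3 ++ [x]) = a0 ++ a1 ++ a2 ++ (a3 ++ [x]) := by simp
      rw [e2, ih a0 a1 a2 (a3 ++ [x]) m0 m1 m2
        (by intro y hy; rcases List.mem_append.1 hy with h | h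
            · exact m3 y h
            · simp at h; subst h; exact hx)]
      simp [fk_cons, hx]

theorem sortedB (tws ql : List String) (vf : Bool) (tw : List (String × String)) :
    PySem.List.sorted tw (prio tws ql vf) false
      = Fk tws ql vf 0 tw ++ Fk tws ql vf 1 tw ++ Fk tws ql vf 2 tw ++ Fk tws ql vf 3 tw := by
  rw [PySem.List.sorted_eq_foldl_insertBy]
  have h := sortedB_aux tws ql vf tw [] [] [] []
    (by simp) (by simp) (by simp) (by simp)
  simpa using h

theorem reorder_tokens_spec' (tw : List (String × String)) (sl : String)
    (tws : List String) (qw : Option (List String)) :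
    reorder_tokens tw sl tws qw = reorder_tokens_alt tw sl tws qw := by
  unfold reorder_tokens reorder_tokens_alt
  simp only [cond_q, time_first_true, if_true, sortedB, List.map_append]
  rw [foldA]
  by_cases hvf : (get_grammar sl).1 = true
  · simp [hvf, grp, List.append_assoc]
  · have hvf' : (get_grammar sl).1 = false := by simpa using hvf
    have h2 : Fk tws (if qwTruthy qw then qw.getD [] else []) (get_grammar sl).1 2 tw = [] := by
      rw [hvf']
      simp only [Fk, List.filter_eq_nil_iff]
      intro tp _
      simpa using prio_ne_two tws (if qwTruthy qw then qw.getD [] else []) tp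
    rw [hvf'] at h2
    simp [hvf', grp, h2, List.append_assoc]

-- ===== VERDICT (by name: the statement is the Claim_ definition above) =====
theorem reorder_tokens_spec : Claim_equal_reorder_tokens := by
  intro tw sl tws qw _
  exact reorder_tokens_spec' tw sl tws qw
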